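-- pv_equiv track=rewrite | github.com/showjihyun/agentrag-v1 | backend/agents/aggregator.py | _parse_planning_steps
-- ===== SOURCE A (Python) =====
-- from typing import Dict, Any, List, Optional, AsyncGenerator
--
-- def _parse_planning_steps(planning_response: str) -> List[str]:
--     """
--     Parse planning steps from LLM response.
--
--     Args:
--         planning_response: Raw planning text
--
--     Returns:
--         List of planning step strings
--     """
--     steps = []
--     lines = planning_response.split("\n")
--
--     current_step = []
--     for line in lines:
--         line = line.strip()
--
--         # Check if this is a step header
--         if line.startswith("Step ") and ":" in line:
--             # Save previous step
--             if current_step: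
--                 steps.append("\n".join(current_step))
--                 current_step = []
--
--             # Start new step
--             current_step.append(line)
--         elif line and current_step:
--             # Add to current step
--             current_step.append(line)
--
--     # Add last step
--     if current_step:
--         steps.append("\n".join(current_step))
--
--     # If no steps found, return the whole response as one step
--     if not steps:
--         steps = [planning_response]
--
--     return steps
-- ===== SOURCE B (Python) =====
-- def _is_header(line):
--     return line.startswith("Step ") and ":" in line
--
--
-- def _body_span(lines):
--     """Non-empty lines before the next header, and the remainder starting at that header."""
--     body = []
--     i = 0
--     while i < len(lines) and not _is_header(lines[i]):
--         if lines[i]: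
--             body.append(lines[i])
--         i += 1
--     return body, lines[i:]
--
--
-- def _parse_planning_steps(planning_response: str):
--     lines = [l.strip() for l in planning_response.split("\n")]
--     # drop everything before the first header
--     while lines and not _is_header(lines[0]):
--         lines = lines[1:]
--     if not lines:
--         return [planning_response]
--     steps = []
--     while lines:
--         body, rest = _body_span(lines[1:])
--         steps.append("\n".join([lines[0]] + body))
--         lines = rest
--     return steps
-- ===== Notes on version B (the rewrite author's own statement) =====
-- stated objective: alternative
-- what changed: Replaces A's single stateful flush-on-header accumulator loop with a strip-all pass, dropping the pre-header prefix, then slicing one segment (header plus following non-empty lines) per header.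
import Mathlib
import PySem

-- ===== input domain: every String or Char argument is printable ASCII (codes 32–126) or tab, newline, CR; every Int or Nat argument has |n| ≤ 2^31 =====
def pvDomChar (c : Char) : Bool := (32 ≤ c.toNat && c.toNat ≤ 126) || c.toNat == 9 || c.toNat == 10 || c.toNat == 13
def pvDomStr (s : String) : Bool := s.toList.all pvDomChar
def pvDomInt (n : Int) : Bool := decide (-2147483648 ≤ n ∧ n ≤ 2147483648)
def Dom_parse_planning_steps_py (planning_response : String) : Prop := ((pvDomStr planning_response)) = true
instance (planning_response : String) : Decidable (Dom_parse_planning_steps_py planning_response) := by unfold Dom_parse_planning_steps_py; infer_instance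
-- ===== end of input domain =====

-- B replaces A's stateful flush-on-header accumulator loop by a strip-all pass, a drop of the
-- pre-header prefix and a segment-slicing recursion (objective: alternative decomposition).

-- ===== PORT A =====
-- the for-loop of A, state = (steps, current_step)
def parseALoop (steps : List String) (cur : List String) : List String → List String
  | [] => if cur ≠ [] then steps ++ [PySem.Str.join "\n" cur] else steps
  | line :: rest =>
    let l := PySem.Str.strip line
    if PySem.Str.startswith l "Step " && PySem.Str.isIn ":" l then
      parseALoop (if cur ≠ [] then steps ++ [PySem.Str.join "\n" cur] else steps) [l] rest
    else if l ≠ "" ∧ cur ≠ [] then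
      parseALoop steps (cur ++ [l]) rest
    else
      parseALoop steps cur rest

def parse_planning_steps_py (planning_response : String) : List String :=
  let steps := parseALoop [] [] ((PySem.Str.split? planning_response "\n").getD [])
  if steps = [] then [planning_response] else steps

-- ===== PORT B =====
def pvIsHeader (l : String) : Bool := PySem.Str.startswith l "Step " && PySem.Str.isIn ":" l

-- _body_span: non-empty lines before the next header, and the remainder starting at that header
def pvBodySpan : List String → List String × List String
  | [] => ([], [])
  | l :: rest =>
    if pvIsHeader l then ([], l :: rest)
    else ((if l ≠ "" then l :: (pvBodySpan rest).1 else (pvBodySpan rest).1), (pvBodySpan rest).2)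

theorem pvBodySpan_len : ∀ ls : List String, (pvBodySpan ls).2.length ≤ ls.length
  | [] => Nat.le_refl _
  | l :: rest => by
    simp only [pvBodySpan]
    split
    · simp
    · exact Nat.le_succ_of_le (pvBodySpan_len rest)

-- the outer while-loop of B: lines starts at a header; one joined step per header
def pvSegs : List String → List String
  | [] => []
  | h :: rest =>
    PySem.Str.join "\n" (h :: (pvBodySpan rest).1) :: pvSegs (pvBodySpan rest).2
termination_by ls => ls.length
decreasing_by exact Nat.lt_succ_of_le (pvBodySpan_len rest)

def parse_planning_steps_py_alt (planning_response : String) : List String :=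
  let lines := ((PySem.Str.split? planning_response "\n").getD []).map PySem.Str.strip
  match lines.dropWhile (fun l => !pvIsHeader l) with
  | [] => [planning_response]
  | h :: rest => pvSegs (h :: rest)

-- ===== PRECONDITION & SPEC =====
def Spec_parse_planning_steps_py (planning_response : String) (out : List String) : Prop := out = parse_planning_steps_py_alt planning_response
instance (planning_response : String) (out : List String) : Decidable (Spec_parse_planning_steps_py planning_response out) := by unfold Spec_parse_planning_steps_py; infer_instance

-- ===== CLAIM (what is proved, stated in full; the proofs are below) =====
def Claim_equal_parse_planning_steps_py : Prop := ∀ (planning_response : String), Dom_parse_planning_steps_py planning_response → Spec_parse_planning_steps_py planning_response (parse_planning_steps_py planning_response)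

-- ===== LEMMAS AND PROOFS =====

-- loop invariant: once current_step is non-empty, A's loop emits exactly the segments B slices
theorem parseALoop_key : ∀ (ls : List String) (steps cur : List String), cur ≠ [] →
    parseALoop steps cur ls =
      steps ++ PySem.Str.join "\n" (cur ++ (pvBodySpan (ls.map PySem.Str.strip)).1)
            :: pvSegs (pvBodySpan (ls.map PySem.Str.strip)).2 := by
  intro ls
  induction ls with
  | nil => intro steps cur hc; simp [parseALoop, pvBodySpan, pvSegs, hc]
  | cons line rest ih =>
    intro steps cur hc
    simp only [parseALoop, List.map_cons, pvBodySpan, pvIsHeader]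
    by_cases hh : (PySem.Str.startswith (PySem.Str.strip line) "Step " &&
        PySem.Str.isIn ":" (PySem.Str.strip line)) = true
    · rw [if_pos hh, if_pos hh, if_pos hc, ih _ [PySem.Str.strip line] (by simp)]
      rw [pvSegs]
      simp
    · rw [if_neg hh, if_neg hh]
      by_cases he : PySem.Str.strip line ≠ ""
      · rw [if_pos ⟨he, hc⟩, ih _ (cur ++ [PySem.Str.strip line]) (by simp), if_pos he]
        simp
      · rw [if_neg (fun hcon => he hcon.1), ih _ cur hc, if_neg he]

-- before the first header A's loop is a no-op; afterwards parseALoop_key applies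
theorem parseALoop_drop : ∀ ls : List String,
    parseALoop [] [] ls =
      match (ls.map PySem.Str.strip).dropWhile (fun l => !pvIsHeader l) with
      | [] => []
      | h :: rest => pvSegs (h :: rest) := by
  intro ls
  induction ls with
  | nil => simp [parseALoop]
  | cons line rest ih =>
    simp only [parseALoop, List.map_cons, List.dropWhile]
    by_cases hh : (PySem.Str.startswith (PySem.Str.strip line) "Step " &&
        PySem.Str.isIn ":" (PySem.Str.strip line)) = true
    · rw [if_pos hh]
      have h1 : pvIsHeader (PySem.Str.strip line) = true := by unfold pvIsHeader; exact hh
      rw [h1]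
      simp only [if_neg (by simp : ¬ ([] : List String) ≠ [])]
      rw [parseALoop_key rest _ [PySem.Str.strip line] (by simp)]
      simp [pvSegs]
    · rw [if_neg hh]
      have h1 : pvIsHeader (PySem.Str.strip line) = false := by
        unfold pvIsHeader; exact eq_false_of_ne_true hh
      rw [h1]
      simp only [if_neg (by simp : ¬ (PySem.Str.strip line ≠ "" ∧ ([] : List String) ≠ []))]
      exact ih

-- ===== VERDICT (by name: the statement is the Claim_ definition above) =====
theorem parse_planning_steps_py_spec : Claim_equal_parse_planning_steps_py := by
  intro pr _
  unfold Spec_parse_planning_steps_py parse_planning_steps_py parse_planning_steps_py_alt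
  rw [parseALoop_drop]
  cases h : (((PySem.Str.split? pr "\n").getD []).map PySem.Str.strip).dropWhile (fun l => !pvIsHeader l) with
  | nil => simp [h]
  | cons a t => simp [h, pvSegs]
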